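-- pv_equiv track=rewrite | github.com/masthom/Music-History-Knowledge-Graph | RowFormGenerator.py | generate_row_forms
-- ===== SOURCE A (Python) =====
-- def generate_row_forms(interval_pattern):
--     """
--     Generiert alle 48 RowForms basierend auf einem Intervallmuster
--     """
--     # Konvertiere Intervallmuster in Liste von Integers
--     intervals = [int(x) for x in interval_pattern.split('_')]
--
--     # 1. PRIME-FORMS (P-Forms)
--     prime_forms = []
--     for start_note in range(12):
--         row = [start_note]
--         current_note = start_note
--         for interval in intervals:
--             current_note = (current_note + interval) % 12
--             row.append(current_note)
--         prime_forms.append(row)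
--
--     # 2. INVERSION-FORMS (I-Forms)
--     inversion_forms = []
--     for start_note in range(12):
--         row = [start_note]
--         current_note = start_note
--         for interval in intervals:
--             current_note = (current_note - interval) % 12
--             row.append(current_note)
--         inversion_forms.append(row)
--
--     # 3. RETROGRADE-FORMS (R-Forms) - Umgekehrte Prime-Forms
--     retrograde_forms = []
--     for p_form in prime_forms:
--         retrograde_forms.append(list(reversed(p_form)))
--
--     # 4. RETROGRADE-INVERSION-FORMS (RI-Forms) - Umgekehrte Inversion-Forms
--     retrograde_inversion_forms = []
--     for i_form in inversion_forms:
--         retrograde_inversion_forms.append(list(reversed(i_form)))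
--
--     return prime_forms, inversion_forms, retrograde_forms, retrograde_inversion_forms
-- ===== SOURCE B (Python) =====
-- def generate_row_forms(interval_pattern):
--     """
--     Generiert alle 48 RowForms: eine gemeinsame Praefixsummen-Tabelle statt
--     einer inneren Akkumulationsschleife pro Startton.
--     """
--     totals = [0]
--     total = 0
--     for iv in [int(x) for x in interval_pattern.split('_')]:
--         total += iv
--         totals.append(total)
--     prime_forms = [[(s + v) % 12 for v in totals] for s in range(12)]
--     inversion_forms = [[(s - v) % 12 for v in totals] for s in range(12)]
--     retrograde_forms = [p[::-1] for p in prime_forms]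
--     retrograde_inversion_forms = [i[::-1] for i in inversion_forms]
--     return prime_forms, inversion_forms, retrograde_forms, retrograde_inversion_forms
-- ===== Notes on version B (the rewrite author's own statement) =====
-- stated objective: alternative
-- what changed: B builds one prefix-sum table of the intervals and produces every prime/inversion form as a mod-12 shift of that shared table (retrogrades by reversal), instead of re-running an inner accumulation loop over the intervals for each of the 24 generated rows.
import Mathlib
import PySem

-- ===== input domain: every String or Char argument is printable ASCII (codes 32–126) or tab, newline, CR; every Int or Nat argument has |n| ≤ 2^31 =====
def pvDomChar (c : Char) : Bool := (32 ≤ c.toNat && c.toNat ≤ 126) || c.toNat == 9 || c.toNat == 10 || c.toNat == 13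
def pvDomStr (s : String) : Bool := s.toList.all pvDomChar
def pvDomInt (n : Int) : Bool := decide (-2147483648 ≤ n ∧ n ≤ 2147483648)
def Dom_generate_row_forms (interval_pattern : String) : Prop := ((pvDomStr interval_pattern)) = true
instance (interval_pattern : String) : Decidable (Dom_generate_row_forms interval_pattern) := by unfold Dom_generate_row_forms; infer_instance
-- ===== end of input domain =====

-- B replaces A's per-row inner accumulation loop by one shared prefix-sum table shifted mod 12 (alternative decomposition, same cost).

-- ===== PORT A =====
-- parsing is exact under Pre_ (every '_'-token of the input parses as a Python int; otherwise Python raises ValueError)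
def generate_row_forms (interval_pattern : String) : List (List Int) × List (List Int) × List (List Int) × List (List Int) :=
  let intervals : List Int := ((PySem.Str.split? interval_pattern "_").getD []).map (fun x => (PySem.Int.ofStr? x).getD 0)
  let prime_forms : List (List Int) :=
    (PySem.List.pyRange 0 12 1).foldl (fun acc start_note =>
      acc ++ [(intervals.foldl (fun (rc : List Int × Int) interval =>
        (rc.1 ++ [PySem.Int.mod (rc.2 + interval) 12], PySem.Int.mod (rc.2 + interval) 12))
        ([start_note], start_note)).1]) []
  let inversion_forms : List (List Int) :=
    (PySem.List.pyRange 0 12 1).foldl (fun acc start_note =>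
      acc ++ [(intervals.foldl (fun (rc : List Int × Int) interval =>
        (rc.1 ++ [PySem.Int.mod (rc.2 - interval) 12], PySem.Int.mod (rc.2 - interval) 12))
        ([start_note], start_note)).1]) []
  let retrograde_forms : List (List Int) :=
    prime_forms.foldl (fun acc p_form => acc ++ [p_form.reverse]) []
  let retrograde_inversion_forms : List (List Int) :=
    inversion_forms.foldl (fun acc i_form => acc ++ [i_form.reverse]) []
  (prime_forms, inversion_forms, retrograde_forms, retrograde_inversion_forms)

-- ===== PORT B =====
def generate_row_forms_alt (interval_pattern : String) : List (List Int) × List (List Int) × List (List Int) × List (List Int) :=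
  let totals : List Int :=
    ((((PySem.Str.split? interval_pattern "_").getD []).map (fun x => (PySem.Int.ofStr? x).getD 0)).foldl
      (fun (tt : List Int × Int) iv => (tt.1 ++ [tt.2 + iv], tt.2 + iv)) ([0], 0)).1
  let prime_forms : List (List Int) :=
    (PySem.List.pyRange 0 12 1).map (fun s => totals.map (fun v => PySem.Int.mod (s + v) 12))
  let inversion_forms : List (List Int) :=
    (PySem.List.pyRange 0 12 1).map (fun s => totals.map (fun v => PySem.Int.mod (s - v) 12))
  (prime_forms, inversion_forms, prime_forms.map List.reverse, inversion_forms.map List.reverse)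

-- ===== PRECONDITION & SPEC =====
-- Pre_ excludes exactly the inputs on which some token of the split pattern is not int-parsable: there Python A raises ValueError (and B raises too).
def Pre_generate_row_forms (interval_pattern : String) : Prop :=
  ((PySem.Str.split? interval_pattern "_").getD []).all (fun x => (PySem.Int.ofStr? x).isSome) = true
instance (interval_pattern : String) : Decidable (Pre_generate_row_forms interval_pattern) := by
  unfold Pre_generate_row_forms; infer_instance
def pvWitness_generate_row_forms : String := "1_2_3"
def Spec_generate_row_forms (interval_pattern : String) (out : List (List Int) × List (List Int) × List (List Int) × List (List Int)) : Prop := out = generate_row_forms_alt interval_pattern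
instance (interval_pattern : String) (out : List (List Int) × List (List Int) × List (List Int) × List (List Int)) : Decidable (Spec_generate_row_forms interval_pattern out) := by unfold Spec_generate_row_forms; infer_instance

-- ===== CLAIM (what is proved, stated in full; the proofs are below) =====
def Claim_equal_generate_row_forms : Prop := ∀ (interval_pattern : String), Dom_generate_row_forms interval_pattern → Pre_generate_row_forms interval_pattern → Spec_generate_row_forms interval_pattern (generate_row_forms interval_pattern)

-- ===== LEMMAS AND PROOFS =====

-- trace of A's inner accumulation loop
def pvTail (f : Int → Int → Int) : Int → List Int → List Int
  | _, [] => []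
  | c, iv :: r => f c iv :: pvTail f (f c iv) r

theorem pvFold_fst (f : Int → Int → Int) (ivs : List Int) : ∀ (row : List Int) (c : Int),
    (ivs.foldl (fun (rc : List Int × Int) iv => (rc.1 ++ [f rc.2 iv], f rc.2 iv)) (row, c)).1
      = row ++ pvTail f c ivs := by
  induction ivs with
  | nil => intro row c; simp [pvTail]
  | cons iv r ih =>
    intro row c
    simp only [List.foldl_cons, pvTail]
    rw [ih]
    simp

theorem pvTail_prime (ivs : List Int) : ∀ (s c t : Int), c % 12 = (s + t) % 12 →
    pvTail (fun c iv => PySem.Int.mod (c + iv) 12) c ivs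
      = (pvTail (fun t iv => t + iv) t ivs).map (fun v => PySem.Int.mod (s + v) 12) := by
  induction ivs with
  | nil => intro s c t _; simp [pvTail]
  | cons iv r ih =>
    intro s c t h
    simp only [pvTail, List.map_cons]
    have h12 : (0:Int) < 12 := by norm_num
    have e1 : PySem.Int.mod (c + iv) 12 = (c + iv) % 12 := PySem.Int.mod_eq_emod_of_pos h12
    have e2 : PySem.Int.mod (s + (t + iv)) 12 = (s + (t + iv)) % 12 := PySem.Int.mod_eq_emod_of_pos h12
    have hv : (c + iv) % 12 = (s + (t + iv)) % 12 := by omega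
    rw [e1, e2, hv, ih s ((s + (t + iv)) % 12) (t + iv) (by omega)]

theorem pvTail_inv (ivs : List Int) : ∀ (s c t : Int), c % 12 = (s - t) % 12 →
    pvTail (fun c iv => PySem.Int.mod (c - iv) 12) c ivs
      = (pvTail (fun t iv => t + iv) t ivs).map (fun v => PySem.Int.mod (s - v) 12) := by
  induction ivs with
  | nil => intro s c t _; simp [pvTail]
  | cons iv r ih =>
    intro s c t h
    simp only [pvTail, List.map_cons]
    have h12 : (0:Int) < 12 := by norm_num
    have e1 : PySem.Int.mod (c - iv) 12 = (c - iv) % 12 := PySem.Int.mod_eq_emod_of_pos h12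
    have e2 : PySem.Int.mod (s - (t + iv)) 12 = (s - (t + iv)) % 12 := PySem.Int.mod_eq_emod_of_pos h12
    have hv : (c - iv) % 12 = (s - (t + iv)) % 12 := by omega
    rw [e1, e2, hv, ih s ((s - (t + iv)) % 12) (t + iv) (by omega)]

-- A's row for start s equals B's shifted-table row, for 0 ≤ s < 12
theorem pvRowP (ivs : List Int) (s : Int) (h0 : 0 ≤ s) (h1 : s < 12) :
    (ivs.foldl (fun (rc : List Int × Int) interval =>
      (rc.1 ++ [PySem.Int.mod (rc.2 + interval) 12], PySem.Int.mod (rc.2 + interval) 12)) ([s], s)).1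
    = ((ivs.foldl (fun (tt : List Int × Int) iv => (tt.1 ++ [tt.2 + iv], tt.2 + iv)) ([0], 0)).1).map
        (fun v => PySem.Int.mod (s + v) 12) := by
  rw [pvFold_fst (fun c iv => PySem.Int.mod (c + iv) 12),
      pvFold_fst (fun t iv => t + iv)]
  rw [pvTail_prime ivs s s 0 (by omega)]
  simp
  omega

theorem pvRowI (ivs : List Int) (s : Int) (h0 : 0 ≤ s) (h1 : s < 12) :
    (ivs.foldl (fun (rc : List Int × Int) interval =>
      (rc.1 ++ [PySem.Int.mod (rc.2 - interval) 12], PySem.Int.mod (rc.2 - interval) 12)) ([s], s)).1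
    = ((ivs.foldl (fun (tt : List Int × Int) iv => (tt.1 ++ [tt.2 + iv], tt.2 + iv)) ([0], 0)).1).map
        (fun v => PySem.Int.mod (s - v) 12) := by
  rw [pvFold_fst (fun c iv => PySem.Int.mod (c - iv) 12),
      pvFold_fst (fun t iv => t + iv)]
  rw [pvTail_inv ivs s s 0 (by omega)]
  simp
  omega

-- ===== VERDICT (by name: the statement is the Claim_ definition above) =====
theorem generate_row_forms_spec : Claim_equal_generate_row_forms := by
  unfold Claim_equal_generate_row_forms
  intro ip _ _
  unfold Spec_generate_row_forms generate_row_forms generate_row_forms_alt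
  simp only [PySem.List.foldl_append_singleton_eq_map, List.nil_append]
  set ivs : List Int := ((PySem.Str.split? ip "_").getD []).map (fun x => (PySem.Int.ofStr? x).getD 0) with hivs
  have hp : (PySem.List.pyRange 0 12 1).map (fun start_note =>
      (ivs.foldl (fun (rc : List Int × Int) interval =>
        (rc.1 ++ [PySem.Int.mod (rc.2 + interval) 12], PySem.Int.mod (rc.2 + interval) 12))
        ([start_note], start_note)).1)
    = (PySem.List.pyRange 0 12 1).map (fun s =>
        (((ivs.foldl (fun (tt : List Int × Int) iv => (tt.1 ++ [tt.2 + iv], tt.2 + iv)) ([0], 0)).1).map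
          (fun v => PySem.Int.mod (s + v) 12))) := by
    apply List.map_congr_left
    intro s hs
    rw [PySem.List.mem_pyRange_one] at hs
    exact pvRowP ivs s hs.1 hs.2
  have hi : (PySem.List.pyRange 0 12 1).map (fun start_note =>
      (ivs.foldl (fun (rc : List Int × Int) interval =>
        (rc.1 ++ [PySem.Int.mod (rc.2 - interval) 12], PySem.Int.mod (rc.2 - interval) 12))
        ([start_note], start_note)).1)
    = (PySem.List.pyRange 0 12 1).map (fun s =>
        (((ivs.foldl (fun (tt : List Int × Int) iv => (tt.1 ++ [tt.2 + iv], tt.2 + iv)) ([0], 0)).1).map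
          (fun v => PySem.Int.mod (s - v) 12))) := by
    apply List.map_congr_left
    intro s hs
    rw [PySem.List.mem_pyRange_one] at hs
    exact pvRowI ivs s hs.1 hs.2
  rw [hp, hi]
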